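-- pv_equiv track=rewrite | github.com/ultramaxim/security-chatbot | main.py | sort_vulns
-- ===== SOURCE A (Python) =====
-- def sort_vulns(dict):
--     count =0
--     return_dict = {}
--     for i in dict:
--         if dict[i]['relation'] == "SELF":
--             return_dict[i]= dict[i]
--             count+=1
--     for i in dict:
--         if dict[i]['relation'] == "DIRECT":
--             return_dict[i]= dict[i]
--             count+=1
--     for i in dict:
--         if dict[i]['relation'] == "INDIRECT":
--             return_dict[i]= dict[i]
--             count+=1
--     return return_dict
-- ===== SOURCE B (Python) =====
-- def sort_vulns(dict):
--     buckets = {"SELF": [], "DIRECT": [], "INDIRECT": []}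
--     for k, v in dict.items():
--         rel = v['relation']
--         if rel in buckets:
--             buckets[rel].append((k, v))
--     return_dict = {}
--     for rel in ("SELF", "DIRECT", "INDIRECT"):
--         for k, v in buckets[rel]:
--             return_dict[k] = v
--     return return_dict
-- ===== Notes on version B (the rewrite author's own statement) =====
-- stated objective: alternative
-- what changed: One pass routing each entry into three ordered buckets (SELF/DIRECT/INDIRECT) followed by a merge, instead of three sequential full scans of the dict.
import Mathlib
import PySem

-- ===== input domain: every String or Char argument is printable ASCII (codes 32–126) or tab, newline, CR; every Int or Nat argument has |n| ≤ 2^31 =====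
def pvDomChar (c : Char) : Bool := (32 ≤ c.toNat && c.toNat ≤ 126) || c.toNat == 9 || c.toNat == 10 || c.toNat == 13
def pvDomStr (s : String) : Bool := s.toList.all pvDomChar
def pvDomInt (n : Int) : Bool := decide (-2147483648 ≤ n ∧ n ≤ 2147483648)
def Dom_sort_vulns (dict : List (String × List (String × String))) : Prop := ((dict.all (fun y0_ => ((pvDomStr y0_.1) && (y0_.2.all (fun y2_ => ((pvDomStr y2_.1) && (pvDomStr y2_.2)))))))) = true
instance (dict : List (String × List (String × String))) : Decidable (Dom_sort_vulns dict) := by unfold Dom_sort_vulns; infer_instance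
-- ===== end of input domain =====

-- B is the same reordering done in ONE pass into three ordered buckets (SELF/DIRECT/INDIRECT)
-- that are then merged, instead of A's three sequential full scans of the dict.

-- shared helper: v['relation'] (exact on Pre_, where the key is present)
def pvRel (v : List (String × String)) : String :=
  (PySem.Dict.ofList v).getD "relation" ""

-- ===== PORT A =====
def sort_vulns (dict : List (String × List (String × String))) : List (String × List (String × String)) :=
  -- count = 0; return_dict = {}
  let s1 := dict.foldl
    (fun (s : PySem.Dict String (List (String × String)) × Int) kv =>
      if pvRel kv.2 == "SELF" then (s.1.insert kv.1 kv.2, s.2 + 1) else s)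
    (PySem.Dict.empty, (0 : Int))
  let s2 := dict.foldl
    (fun (s : PySem.Dict String (List (String × String)) × Int) kv =>
      if pvRel kv.2 == "DIRECT" then (s.1.insert kv.1 kv.2, s.2 + 1) else s) s1
  let s3 := dict.foldl
    (fun (s : PySem.Dict String (List (String × String)) × Int) kv =>
      if pvRel kv.2 == "INDIRECT" then (s.1.insert kv.1 kv.2, s.2 + 1) else s) s2
  s3.1.items

-- B-side helper: one step of the bucket pass
def pvBStep (b : List (String × List (String × String)) × List (String × List (String × String)) × List (String × List (String × String)))
    (kv : String × List (String × String)) :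
    List (String × List (String × String)) × List (String × List (String × String)) × List (String × List (String × String)) :=
  let r := pvRel kv.2
  if r == "SELF" then (b.1 ++ [kv], b.2.1, b.2.2)
  else if r == "DIRECT" then (b.1, b.2.1 ++ [kv], b.2.2)
  else if r == "INDIRECT" then (b.1, b.2.1, b.2.2 ++ [kv])
  else b

-- ===== PORT B =====
def sort_vulns_alt (dict : List (String × List (String × String))) : List (String × List (String × String)) :=
  let b := dict.foldl pvBStep ([], [], [])
  ((b.1 ++ b.2.1 ++ b.2.2).foldl
    (fun (out : PySem.Dict String (List (String × String))) kv => out.insert kv.1 kv.2)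
    PySem.Dict.empty).items

-- ===== PRECONDITION & SPEC =====
-- Pre_ excludes exactly the inputs where some value lacks the 'relation' key: there the Python A
-- (and B alike) raises KeyError instead of returning.
def Pre_sort_vulns (dict : List (String × List (String × String))) : Prop :=
  (dict.all (fun kv => ((PySem.Dict.ofList kv.2).get? "relation").isSome)) = true
instance (dict : List (String × List (String × String))) : Decidable (Pre_sort_vulns dict) := by
  unfold Pre_sort_vulns; infer_instance

def pvWitness_sort_vulns : (List (String × List (String × String))) :=
  [("a", [("relation", "DIRECT")]), ("b", [("relation", "SELF"), ("x", "1")])]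

def Spec_sort_vulns (dict : List (String × List (String × String))) (out : List (String × List (String × String))) : Prop := out = sort_vulns_alt dict
instance (dict : List (String × List (String × String))) (out : List (String × List (String × String))) : Decidable (Spec_sort_vulns dict out) := by unfold Spec_sort_vulns; infer_instance

-- ===== CLAIM (what is proved, stated in full; the proofs are below) =====
def Claim_equal_sort_vulns : Prop := ∀ (dict : List (String × List (String × String))), Dom_sort_vulns dict → Pre_sort_vulns dict → Spec_sort_vulns dict (sort_vulns dict)

-- ===== LEMMAS AND PROOFS =====

-- abbreviations used only by the proofs
def pvIns (d : PySem.Dict String (List (String × String)))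
    (kv : String × List (String × String)) : PySem.Dict String (List (String × String)) :=
  d.insert kv.1 kv.2

-- A's loop: the first component is an insert-fold over the filtered list
theorem pvA_loop (p : String × List (String × String) → Bool)
    (l : List (String × List (String × String)))
    (d : PySem.Dict String (List (String × String))) (c : Int) :
    (l.foldl (fun s kv => if p kv then (s.1.insert kv.1 kv.2, s.2 + 1) else s) (d, c)).1
      = (l.filter p).foldl pvIns d := by
  induction l generalizing d c with
  | nil => rfl
  | cons kv t ihA =>
    by_cases h : p kv = true <;> simp [h, ihA, pvIns]

-- B's bucket pass produces exactly the three filtered sublists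
theorem pvB_buckets (l : List (String × List (String × String)))
    (s d i : List (String × List (String × String))) :
    l.foldl pvBStep (s, d, i)
      = (s ++ l.filter (fun kv => pvRel kv.2 == "SELF"),
         d ++ l.filter (fun kv => pvRel kv.2 == "DIRECT"),
         i ++ l.filter (fun kv => pvRel kv.2 == "INDIRECT")) := by
  induction l generalizing s d i with
  | nil => simp
  | cons kv t ih =>
    rw [List.foldl_cons]
    by_cases hS : pvRel kv.2 = "SELF"
    · have h1 : pvBStep (s, d, i) kv = (s ++ [kv], d, i) := by simp [pvBStep, hS]
      rw [h1, ih]; simp [hS]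
    · by_cases hD : pvRel kv.2 = "DIRECT"
      · have h1 : pvBStep (s, d, i) kv = (s, d ++ [kv], i) := by simp [pvBStep, hD]
        rw [h1, ih]; simp [hD]
      · by_cases hI : pvRel kv.2 = "INDIRECT"
        · have h1 : pvBStep (s, d, i) kv = (s, d, i ++ [kv]) := by simp [pvBStep, hI]
          rw [h1, ih]; simp [hI]
        · have h1 : pvBStep (s, d, i) kv = (s, d, i) := by simp [pvBStep, hS, hD, hI]
          rw [h1, ih]; simp [hS, hD, hI]

-- ===== VERDICT (by name: the statement is the Claim_ definition above) =====
theorem sort_vulns_spec : Claim_equal_sort_vulns := by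
  intro dict _ _
  unfold Spec_sort_vulns sort_vulns sort_vulns_alt
  rw [pvB_buckets]
  simp only [List.nil_append]
  rw [List.foldl_append, List.foldl_append]
  rw [pvA_loop, pvA_loop, pvA_loop]
  rfl
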